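-- pv_equiv track=rewrite | github.com/Igrekess/PersistenceTheory | scripts/convergence/test_crible_variationnel.py | get_k_rough_gaps
-- ===== SOURCE A (Python) =====
-- small_primes = [2, 3, 5, 7, 11, 13, 17, 19, 23, 29, 31, 37, 41, 43, 47]
--
-- def get_k_rough_gaps(k, N):
--     """
--     Retourne les ecarts entre k-rough numbers <= N.
--     k=0: tous les entiers >= 2 (gaps = 1)
--     k=1: nombres impairs >= 3 (gaps = 2)
--     k=2: non divisibles par 2 et 3 (gaps = 2 ou 4)
--     ...
--     k=inf: nombres premiers (gaps varies)
--     """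
--     if k == 0:
--         return list(range(2, N+1)), [1] * (N-1)
--
--     # Construire le crible
--     sieve = bytearray([1]) * (N + 1)
--     sieve[0] = 0
--     sieve[1] = 0
--
--     for i in range(min(k, len(small_primes))):
--         p = small_primes[i]
--         # Garder p lui-meme, retirer ses multiples
--         for j in range(2*p, N+1, p):
--             sieve[j] = 0
--
--     survivors = [n for n in range(2, N+1) if sieve[n]]
--     gaps = [survivors[i+1] - survivors[i] for i in range(len(survivors)-1)]
--     return survivors, gaps
-- ===== SOURCE B (Python) =====
-- small_primes = [2, 3, 5, 7, 11, 13, 17, 19, 23, 29, 31, 37, 41, 43, 47]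
--
-- def get_k_rough_gaps(k, N):
--     """Trial division instead of a sieve: keep n iff no selected small prime
--     properly divides it (the prime itself survives)."""
--     if k == 0:
--         return list(range(2, N+1)), [1] * (N-1)
--     ps = small_primes[:k] if 0 < k else []
--     survivors = [n for n in range(2, N+1)
--                  if all(n % p != 0 or n == p for p in ps)]
--     gaps = [b - a for a, b in zip(survivors, survivors[1:])]
--     return survivors, gaps
-- ===== Notes on version B (the rewrite author's own statement) =====
-- stated objective: simpler
-- what changed: Replaces the mutable bytearray sieve (mark multiples of each selected small prime, then scan the buffer) with a direct trial-division filter: n survives iff every selected prime either does not divide n or equals n; gaps come from zipping consecutive survivors.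
import Mathlib
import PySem

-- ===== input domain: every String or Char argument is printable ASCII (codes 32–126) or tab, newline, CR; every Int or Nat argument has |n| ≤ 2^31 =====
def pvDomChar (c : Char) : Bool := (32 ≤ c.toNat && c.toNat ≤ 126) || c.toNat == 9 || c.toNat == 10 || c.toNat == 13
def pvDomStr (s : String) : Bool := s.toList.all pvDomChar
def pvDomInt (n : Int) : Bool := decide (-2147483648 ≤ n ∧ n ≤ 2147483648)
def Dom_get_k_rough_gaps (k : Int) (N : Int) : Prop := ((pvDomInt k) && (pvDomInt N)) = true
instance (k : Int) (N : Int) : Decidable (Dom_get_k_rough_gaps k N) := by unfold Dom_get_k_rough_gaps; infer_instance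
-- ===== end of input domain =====

-- B replaces A's mutable byte sieve with a direct trial-division filter (simpler; same results on Pre_).

-- ===== PORT A =====
def small_primes : List Int := [2, 3, 5, 7, 11, 13, 17, 19, 23, 29, 31, 37, 41, 43, 47]

-- sieve[j] = 0 on an out-of-range j is a no-op here (List.set); Pre_ keeps the indices in range.
def get_k_rough_gaps (k : Int) (N : Int) : List Int × List Int :=
  if k = 0 then
    (PySem.List.pyRange 2 (N+1) 1, List.replicate (N-1).toNat (1 : Int))
  else
    let sieve0 : List Int := List.replicate (N+1).toNat 1
    let sieve1 := (sieve0.set 0 0).set 1 0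
    let sieve := (PySem.List.pyRange 0 (min k (PySem.List.len small_primes)) 1).foldl
      (fun sv i =>
        (PySem.List.pyRange (2*(PySem.List.pyGetD small_primes i 0)) (N+1)
            (PySem.List.pyGetD small_primes i 0)).foldl (fun s j => s.set j.toNat 0) sv) sieve1
    let survivors := (PySem.List.pyRange 2 (N+1) 1).filter
      (fun n => PySem.List.pyGetD sieve n 0 != 0)
    let gaps := (PySem.List.pyRange 0 ((survivors.length : Int) - 1) 1).map
      (fun i => PySem.List.pyGetD survivors (i+1) 0 - PySem.List.pyGetD survivors i 0)
    (survivors, gaps)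

-- ===== PORT B =====
def get_k_rough_gaps_alt (k : Int) (N : Int) : List Int × List Int :=
  if k = 0 then
    (PySem.List.pyRange 2 (N+1) 1, List.replicate (N-1).toNat (1 : Int))
  else
    let ps : List Int := if 0 < k then PySem.List.slice small_primes none (some k) else []
    let survivors := (PySem.List.pyRange 2 (N+1) 1).filter
      (fun n => ps.all (fun p => (PySem.Int.mod n p != 0) || (n == p)))
    let gaps := (survivors.zip (PySem.List.slice survivors (some 1) none)).map
      (fun ab => ab.2 - ab.1)
    (survivors, gaps)

-- ===== PRECONDITION & SPEC =====
-- A raises IndexError (sieve[0] = 0 / sieve[1] = 0 on a too-short bytearray) when k ≠ 0 and N ≤ 0.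
def Pre_get_k_rough_gaps (k : Int) (N : Int) : Prop := k = 0 ∨ 1 ≤ N
instance (k : Int) (N : Int) : Decidable (Pre_get_k_rough_gaps k N) := by
  unfold Pre_get_k_rough_gaps; infer_instance
def pvWitness_get_k_rough_gaps : Int × Int := (2, 30)

def Spec_get_k_rough_gaps (k : Int) (N : Int) (out : List Int × List Int) : Prop :=
  out = get_k_rough_gaps_alt k N
instance (k : Int) (N : Int) (out : List Int × List Int) : Decidable (Spec_get_k_rough_gaps k N out) := by
  unfold Spec_get_k_rough_gaps; infer_instance

-- ===== CLAIM (what is proved, stated in full; the proofs are below) =====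
def Claim_equal_get_k_rough_gaps : Prop := ∀ (k : Int) (N : Int), Dom_get_k_rough_gaps k N → Pre_get_k_rough_gaps k N → Spec_get_k_rough_gaps k N (get_k_rough_gaps k N)

-- ===== LEMMAS AND PROOFS =====

-- length is preserved by the marking fold
lemma length_foldl_set (L : List Int) : ∀ (sv : List Int),
    (L.foldl (fun s j => s.set j.toNat 0) sv).length = sv.length := by
  induction L with
  | nil => intro sv; rfl
  | cons j L ih => intro sv; simp [List.foldl_cons, ih]

-- the inner marking loop, elementwise
lemma getElem?_foldl_set (L : List Int) : ∀ (sv : List Int) (m : Nat),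
    (L.foldl (fun s j => s.set j.toNat 0) sv)[m]? =
      if m < sv.length ∧ L.any (fun j => j.toNat == m) then some 0 else sv[m]? := by
  induction L with
  | nil => intro sv m; simp
  | cons j L ih =>
    intro sv m
    rw [List.foldl_cons, ih]
    by_cases hj : j.toNat = m
    · subst hj
      by_cases hm : j.toNat < sv.length
      · simp [hm]
      · simp [hm]
    · simp [hj]

-- the whole nested marking loop, elementwise (g i is the list of indices marked for i)
lemma getElem?_foldl_foldl_set (g : Int → List Int) (L : List Int) : ∀ (sv : List Int) (m : Nat),
    (L.foldl (fun s i => (g i).foldl (fun s j => s.set j.toNat 0) s) sv)[m]? =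
      if m < sv.length ∧ L.any (fun i => (g i).any (fun j => j.toNat == m)) then some 0
      else sv[m]? := by
  induction L with
  | nil => intro sv m; simp
  | cons i L ih =>
    intro sv m
    rw [List.foldl_cons, ih, getElem?_foldl_set, length_foldl_set]
    by_cases hm : m < sv.length
    · by_cases hi : (g i).any (fun j => j.toNat == m)
      · simp [hm, hi]
      · simp [hm, hi]
    · simp [hm]

-- the index range A iterates over reads off exactly the first K primes
lemma map_getD_range (K : Nat) (hK : K ≤ small_primes.length) :
    (PySem.List.pyRange 0 (K : Int) 1).map (fun i => PySem.List.pyGetD small_primes i 0) =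
      small_primes.take K := by
  have h := PySem.List.map_pyGetD_pyRange_zero (small_primes.take K) (0 : Int)
  simp only [PySem.List.len, List.length_take, min_eq_left hK] at h
  rw [← h]
  apply List.map_congr_left
  intro i hi
  rw [PySem.List.mem_pyRange_one] at hi
  rw [PySem.List.pyGetD_of_nonneg _ _ hi.1, PySem.List.pyGetD_of_nonneg _ _ hi.1]
  have hlt : i.toNat < K := by omega
  rw [List.getD_eq_getElem?_getD, List.getD_eq_getElem?_getD,
      List.getElem?_take_of_lt hlt]

-- divisibility vs "proper multiple" for a prime-sized divisor
lemma proper_multiple_iff (p n : Int) (hp : 2 ≤ p) (hn : 2 ≤ n) :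
    (p ∣ n ∧ 2*p ≤ n) ↔ (PySem.Int.mod n p = 0 ∧ n ≠ p) := by
  rw [PySem.Int.mod_eq_zero_iff_dvd]
  constructor
  · rintro ⟨hd, hle⟩
    exact ⟨hd, by omega⟩
  · rintro ⟨hd, hne⟩
    refine ⟨hd, ?_⟩
    obtain ⟨t, ht⟩ := hd
    have ht1 : 1 ≤ t := by nlinarith
    have ht2 : 2 ≤ t := by
      rcases lt_or_ge t 2 with h | h
      · have h1 : t = 1 := by omega
        subst h1; simp at ht; omega
      · exact h
    nlinarith

-- the gaps-by-index list equals the gaps-by-zip list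
lemma gaps_eq (xs : List Int) :
    (PySem.List.pyRange 0 ((xs.length : Int) - 1) 1).map
        (fun i => PySem.List.pyGetD xs (i+1) 0 - PySem.List.pyGetD xs i 0) =
      (xs.zip xs.tail).map (fun ab => ab.2 - ab.1) := by
  apply List.ext_getElem
  · simp [PySem.List.length_pyRange_one, List.length_zip, List.length_tail]
  · intro i h1 h2
    have hlen : (PySem.List.pyRange 0 ((xs.length : Int) - 1) 1).length = xs.length - 1 := by
      simp [PySem.List.length_pyRange_one]
    rw [List.getElem_map, List.getElem_map]
    have hi : i < xs.length - 1 := by rw [List.length_map, hlen] at h1; exact h1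
    have hr : (PySem.List.pyRange 0 ((xs.length : Int) - 1) 1)[i] = (0 : Int) + i := by
      apply PySem.List.getElem_pyRange_one
    rw [hr]
    have e1 : PySem.List.pyGetD xs ((0:Int) + i + 1) 0 = xs.getD (i+1) 0 := by
      have h' : ((0:Int) + i + 1) = ((i+1 : Nat) : Int) := by push_cast; ring
      rw [h', PySem.List.pyGetD_natCast]
    have e2 : PySem.List.pyGetD xs ((0:Int) + i) 0 = xs.getD i 0 := by
      have h' : ((0:Int) + i) = ((i : Nat) : Int) := by ring
      rw [h', PySem.List.pyGetD_natCast]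
    have hilen : i < xs.length := by omega
    have hi1len : i + 1 < xs.length := by omega
    rw [e1, e2, List.getD_eq_getElem _ _ hi1len, List.getD_eq_getElem _ _ hilen]
    simp [List.getElem_zip, List.getElem_tail]

lemma small_primes_two_le : ∀ p ∈ small_primes, 2 ≤ p := by decide

-- B's prefix of the prime list is exactly the prefix A's index loop reads
lemma ps_eq (k : Int) (hk : 0 < k) :
    PySem.List.slice small_primes none (some k) = small_primes.take (min k 15).toNat := by
  rw [PySem.List.slice_to _ (le_of_lt hk)]
  rcases le_or_gt k 15 with h | h
  · congr 1; omega
  · rw [List.take_of_length_le, List.take_of_length_le]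
    · simp [small_primes]; omega
    · simp [small_primes]; omega

-- the filter predicates agree on every n the range produces
lemma pred_eq (k N n : Int) (hk : k ≠ 0) (hN : 1 ≤ N) (hn2 : 2 ≤ n) (hnN : n < N + 1) :
    (PySem.List.pyGetD ((PySem.List.pyRange 0 (min k (PySem.List.len small_primes)) 1).foldl
        (fun sv i =>
          (PySem.List.pyRange (2*(PySem.List.pyGetD small_primes i 0)) (N+1)
              (PySem.List.pyGetD small_primes i 0)).foldl (fun s j => s.set j.toNat 0) sv)
        (((List.replicate (N+1).toNat (1:Int)).set 0 0).set 1 0)) n 0 != 0) =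
    ((if 0 < k then PySem.List.slice small_primes none (some k) else []).all
        (fun p => (PySem.Int.mod n p != 0) || (n == p))) := by
  have hlen : PySem.List.len small_primes = 15 := by decide
  rw [hlen]
  -- evaluate the sieve read
  have h0n : (0:Int) ≤ n := by omega
  rw [PySem.List.pyGetD_of_nonneg _ _ h0n, List.getD_eq_getElem?_getD,
      getElem?_foldl_foldl_set (fun i =>
        PySem.List.pyRange (2*(PySem.List.pyGetD small_primes i 0)) (N+1)
          (PySem.List.pyGetD small_primes i 0))]
  have hmlt : n.toNat < (((List.replicate (N+1).toNat (1:Int)).set 0 0).set 1 0).length := by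
    simp; omega
  have hbase : ((((List.replicate (N+1).toNat (1:Int)).set 0 0).set 1 0))[n.toNat]? = some 1 := by
    rw [List.getElem?_set, List.getElem?_set]
    have h1 : ¬ (1 = n.toNat) := by omega
    have h0 : ¬ (0 = n.toNat) := by omega
    simp only [h1, h0, if_false]
    rw [List.getElem?_replicate]
    simp at hmlt ⊢
    omega
  -- reduce the outer any over indices to an any over the taken prefix
  set F : Int → Bool := fun p =>
    (PySem.List.pyRange (2*p) (N+1) p).any (fun j => j.toNat == n.toNat) with hF
  have houter : ∀ (K : Nat), K ≤ 15 →
      ((PySem.List.pyRange 0 (K : Int) 1).any (fun i =>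
        F (PySem.List.pyGetD small_primes i 0))) = (small_primes.take K).any F := by
    intro K hK
    have hK' : K ≤ small_primes.length := by simp [small_primes]; omega
    rw [← map_getD_range K hK', List.any_map]
    rfl
  -- each prime's range hits n iff n is a proper multiple of it
  have hFiff : ∀ p ∈ small_primes, (F p = true ↔ (PySem.Int.mod n p = 0 ∧ n ≠ p)) := by
    intro p hp
    have hp2 : 2 ≤ p := small_primes_two_le p hp
    rw [hF]
    simp only [List.any_eq_true]
    constructor
    · rintro ⟨j, hj, hje⟩
      rw [PySem.List.mem_pyRange_iff_of_pos (by omega)] at hj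
      obtain ⟨hj1, hj2, hj3⟩ := hj
      have hjn : j = n := by
        have : j.toNat = n.toNat := by simpa using hje
        omega
      rw [hjn] at hj1 hj3
      have hdvd : p ∣ n := by
        have h2p : p ∣ 2*p := dvd_mul_left p 2
        have := dvd_add hj3 h2p
        simpa using this
      exact ((proper_multiple_iff p n hp2 hn2).mp ⟨hdvd, hj1⟩)
    · intro h
      obtain ⟨hdvd, hle⟩ := (proper_multiple_iff p n hp2 hn2).mpr h
      refine ⟨n, ?_, by simp⟩
      rw [PySem.List.mem_pyRange_iff_of_pos (by omega)]
      refine ⟨hle, hnN, ?_⟩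
      exact dvd_sub hdvd (dvd_mul_left p 2)
  -- now case on the sign of k and compute both sides
  rcases lt_or_gt_of_ne hk with hneg | hpos
  · have hmin : min k 15 = k := by omega
    rw [hmin, PySem.List.pyRange_one_eq_nil (by omega)]
    simp [hbase, not_lt.mpr (le_of_lt hneg)]
  · have hKnat : ((min k 15).toNat : Int) = min k 15 := by omega
    have hKle : (min k 15).toNat ≤ 15 := by omega
    rw [← hKnat, houter _ hKle, if_pos hpos, ps_eq k hpos]
    by_cases hhit : (small_primes.take (min k 15).toNat).any F
    · rw [if_pos ⟨hmlt, hhit⟩]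
      simp only [Option.getD_some]
      rw [List.any_eq_true] at hhit
      obtain ⟨p, hp, hFp⟩ := hhit
      have hpn := (hFiff p (List.mem_of_mem_take hp)).mp hFp
      have hfalse : ((PySem.Int.mod n p != 0) || (n == p)) = false := by
        simp only [Bool.or_eq_false_iff, bne_eq_false_iff_eq, beq_eq_false_iff_ne]
        exact ⟨hpn.1, hpn.2⟩
      simp only [bne_self_eq_false]
      symm
      rw [List.all_eq_false]
      exact ⟨p, hp, by simp [hfalse]⟩
    · rw [if_neg (by simp [hhit])]
      rw [hbase]
      simp only [Option.getD_some]
      have : ∀ p ∈ small_primes.take (min k 15).toNat,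
          ((PySem.Int.mod n p != 0) || (n == p)) = true := by
        intro p hp
        have hFp : F p = false := by
          rcases Bool.eq_false_or_eq_true (F p) with h | h
          · exact absurd (List.any_eq_true.mpr ⟨p, hp, h⟩) (by simp [hhit])
          · exact h
        have hiff := hFiff p (List.mem_of_mem_take hp)
        simp only [Bool.or_eq_true, bne_iff_ne, beq_iff_eq]
        by_contra hc
        push Not at hc
        exact absurd (hiff.mpr ⟨hc.1, hc.2⟩) (by simp [hFp])
      simp [List.all_eq_true.mpr this]

theorem get_k_rough_gaps_spec : Claim_equal_get_k_rough_gaps := by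
  intro k N _ hpre
  unfold Spec_get_k_rough_gaps get_k_rough_gaps get_k_rough_gaps_alt
  by_cases hk : k = 0
  · simp [hk]
  · have hN : 1 ≤ N := by rcases hpre with h|h; exact absurd h hk; exact h
    simp only [hk, if_false]
    have hsurv :
        (PySem.List.pyRange 2 (N+1) 1).filter
          (fun n => PySem.List.pyGetD ((PySem.List.pyRange 0 (min k (PySem.List.len small_primes)) 1).foldl
            (fun sv i =>
              (PySem.List.pyRange (2*(PySem.List.pyGetD small_primes i 0)) (N+1)
                  (PySem.List.pyGetD small_primes i 0)).foldl (fun s j => s.set j.toNat 0) sv)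
            (((List.replicate (N+1).toNat (1:Int)).set 0 0).set 1 0)) n 0 != 0) =
        (PySem.List.pyRange 2 (N+1) 1).filter
          (fun n => (if 0 < k then PySem.List.slice small_primes none (some k) else []).all
            (fun p => (PySem.Int.mod n p != 0) || (n == p))) := by
      apply List.filter_congr
      intro n hn
      rw [PySem.List.mem_pyRange_one] at hn
      exact pred_eq k N n hk hN hn.1 hn.2
    rw [hsurv, gaps_eq, PySem.List.slice_from_one]
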